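-- pv_equiv track=rewrite | github.com/mbrav/practicum_algorithms | b.py | game_sim
-- ===== SOURCE A (Python) =====
-- from collections import Counter
--
-- def game_sim(key, arr):
--     result = []
--     for i, v in Counter(arr).items():
--         if v <= key*2:
--             result.append(i)
--     score = 0
--     for i in range(1, 10):
--         for k, value in Counter(arr).items():
--             if i == k and value <= key*2:
--                 score += 1
--     return score
-- ===== SOURCE B (Python) =====
-- def game_sim(key, arr):
--     counts = [0] * 9
--     for x in arr:
--         if 1 <= x <= 9:
--             counts[x - 1] += 1
--     limit = key * 2
--     score = 0
--     for c in counts: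
--         if 1 <= c <= limit:
--             score += 1
--     return score
-- ===== Notes on version B (the rewrite author's own statement) =====
-- stated objective: simpler
-- what changed: Replaces the Counter dict (rebuilt inside a 9-by-distinct nested scan, plus a dead result list) with one pass over arr tallying digits 1..9 into a fixed 9-slot array, then one scan of that array.
import Mathlib
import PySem

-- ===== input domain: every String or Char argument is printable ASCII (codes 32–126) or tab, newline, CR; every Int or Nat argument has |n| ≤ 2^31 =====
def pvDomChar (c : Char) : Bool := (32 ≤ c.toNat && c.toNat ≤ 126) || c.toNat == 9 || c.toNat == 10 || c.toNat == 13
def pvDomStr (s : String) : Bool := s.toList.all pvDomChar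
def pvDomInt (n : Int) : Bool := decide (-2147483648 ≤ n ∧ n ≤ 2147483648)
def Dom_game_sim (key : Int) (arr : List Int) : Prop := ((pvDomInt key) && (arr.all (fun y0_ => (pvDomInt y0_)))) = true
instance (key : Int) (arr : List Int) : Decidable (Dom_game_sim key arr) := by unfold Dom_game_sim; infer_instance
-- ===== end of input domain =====

-- B replaces A's Counter dict (rebuilt for each digit inside a nested scan, plus a dead
-- result list) with one tallying pass into a fixed 9-slot array and one scan of it: simpler.

-- ===== PORT A =====
def game_sim (key : Int) (arr : List Int) : Int :=
  -- result = []; for i, v in Counter(arr).items(): if v <= key*2: result.append(i)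
  let _result : List Int :=
    (PySem.Dict.counter arr).items.foldl
      (fun r kv => if kv.2 ≤ key * 2 then r ++ [kv.1] else r) []
  -- score = 0; for i in range(1,10): for k, value in Counter(arr).items(): …
  let score : Int :=
    (PySem.List.pyRange 1 10 1).foldl
      (fun s i =>
        (PySem.Dict.counter arr).items.foldl
          (fun s kv => if i = kv.1 ∧ kv.2 ≤ key * 2 then s + 1 else s) s)
      0
  score

-- ===== PORT B =====
def game_sim_alt (key : Int) (arr : List Int) : Int :=
  -- counts = [0]*9; for x in arr: if 1 <= x <= 9: counts[x-1] += 1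
  let counts : List Int :=
    arr.foldl
      (fun cs x =>
        if 1 ≤ x ∧ x ≤ 9 then cs.set (x - 1).toNat (cs.getD (x - 1).toNat 0 + 1) else cs)
      (List.replicate 9 0)
  let limit := key * 2
  -- score = 0; for c in counts: if 1 <= c <= limit: score += 1
  counts.foldl (fun s c => if 1 ≤ c ∧ c ≤ limit then s + 1 else s) 0

-- ===== PRECONDITION & SPEC =====
def Spec_game_sim (key : Int) (arr : List Int) (out : Int) : Prop := out = game_sim_alt key arr
instance (key : Int) (arr : List Int) (out : Int) : Decidable (Spec_game_sim key arr out) := by unfold Spec_game_sim; infer_instance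

-- ===== CLAIM (what is proved, stated in full; the proofs are below) =====
def Claim_equal_game_sim : Prop := ∀ (key : Int) (arr : List Int), Dom_game_sim key arr → Spec_game_sim key arr (game_sim key arr)

-- ===== LEMMAS AND PROOFS =====

-- A scan over (k, f k) pairs with distinct keys adds 1 exactly when i is a key and P holds at it.
theorem scan_pairs (f : Int → Int) (P : Int → Prop) [DecidablePred P] (i : Int) :
    ∀ (ks : List Int), ks.Nodup → ∀ (s : Int),
    (ks.map (fun k => (k, f k))).foldl
      (fun s kv => if i = kv.1 ∧ P kv.2 then s + 1 else s) s
    = s + (if i ∈ ks ∧ P (f i) then 1 else 0) := by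
  intro ks
  induction ks with
  | nil => intro _ s; simp
  | cons k ks ih =>
    intro hnd s
    rcases List.nodup_cons.mp hnd with ⟨hk, hnd'⟩
    simp only [List.map_cons, List.foldl_cons]
    by_cases hik : i = k
    · subst hik
      by_cases hP : P (f i)
      · rw [if_pos ⟨rfl, hP⟩, ih hnd' (s + 1)]
        simp [hk, hP]
      · rw [if_neg (by tauto), ih hnd' s]
        simp [hk, hP]
    · rw [if_neg (by tauto), ih hnd' s]
      simp [hik]

-- A's score counts the digits 1..9 that occur in arr with count ≤ key*2.
theorem game_sim_eq_countP (key : Int) (arr : List Int) :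
    game_sim key arr
    = ((PySem.List.pyRange 1 10 1).countP
        (fun i => decide (i ∈ arr ∧ (arr.count i : Int) ≤ key * 2)) : Int) := by
  unfold game_sim
  have hinner : ∀ (s i : Int),
      (PySem.Dict.counter arr).items.foldl
        (fun s kv => if i = kv.1 ∧ kv.2 ≤ key * 2 then s + 1 else s) s
      = if i ∈ arr ∧ (arr.count i : Int) ≤ key * 2 then s + 1 else s := by
    intro s i
    rw [PySem.Dict.items_counter]
    rw [scan_pairs (fun k => (arr.count k : Int)) (fun v => v ≤ key * 2) i
        (PySem.Set.ofList arr) (PySem.Set.nodup_ofList arr) s]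
    simp only [PySem.Set.mem_ofList]
    split_ifs <;> simp
  rw [PySem.List.foldl_congr_mem _ _
        (fun s i => if i ∈ arr ∧ (arr.count i : Int) ≤ key * 2 then s + 1 else s) _
        (fun s i _ => hinner s i)]
  rw [PySem.List.foldl_ite_add_one (fun i => i ∈ arr ∧ (arr.count i : Int) ≤ key * 2)]
  simp

-- B's tally array is pointwise the occurrence counts of the digits 1..9.
theorem tally_counts (arr : List Int) :
    arr.foldl
      (fun cs x =>
        if 1 ≤ x ∧ x ≤ 9 then cs.set (x - 1).toNat (cs.getD (x - 1).toNat 0 + 1) else cs)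
      (List.replicate 9 0)
    = (List.range 9).map (fun n : Nat => (arr.count ((n : Int) + 1) : Int)) := by
  have main : ∀ (l cs : List Int), cs.length = 9 →
      l.foldl
        (fun cs x =>
          if 1 ≤ x ∧ x ≤ 9 then cs.set (x - 1).toNat (cs.getD (x - 1).toNat 0 + 1) else cs)
        cs
      = (List.range 9).map (fun n => cs.getD n 0 + (l.count ((n : Int) + 1) : Int)) := by
    intro l
    induction l with
    | nil =>
      intro cs hlen
      refine List.ext_getElem (by simp [hlen]) ?_
      intro n h1 h2
      have hn : n < 9 := by simpa using h2
      simp only [List.getElem_map, List.getElem_range, List.count_nil,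
        List.getD_eq_getElem?_getD]
      rw [List.getElem?_eq_getElem (show n < cs.length by omega)]
      simp
    | cons x l ih =>
      intro cs hlen
      simp only [List.foldl_cons]
      by_cases hx : 1 ≤ x ∧ x ≤ 9
      · rw [if_pos hx, ih _ (by simp [hlen])]
        refine List.ext_getElem (by simp) ?_
        intro n h1 h2
        have hn : n < 9 := by simpa using h2
        simp only [List.getElem_map, List.getElem_range]
        by_cases hne : n = (x - 1).toNat
        · subst hne
          have hxeq : x = (((x - 1).toNat : Nat) : Int) + 1 := by omega
          rw [List.getD_eq_getElem?_getD, List.getElem?_set_self (by omega)]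
          rw [← hxeq, List.count_cons_self]
          rw [List.getD_eq_getElem?_getD, List.getElem?_eq_getElem (by omega)]
          simp only [Option.getD_some]
          push_cast
          ring
        · rw [List.getD_eq_getElem?_getD, List.getElem?_set_ne (fun h => hne h.symm),
              ← List.getD_eq_getElem?_getD]
          rw [List.count_cons_of_ne (by omega)]
      · rw [if_neg hx, ih _ hlen]
        refine List.ext_getElem (by simp) ?_
        intro n h1 h2
        have hn : n < 9 := by simpa using h2
        simp only [List.getElem_map, List.getElem_range]
        rw [List.count_cons_of_ne (by omega)]
  rw [main arr (List.replicate 9 0) (by simp)]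
  refine List.ext_getElem (by simp) ?_
  intro n h1 h2
  have hn : n < 9 := by simpa using h2
  simp only [List.getElem_map, List.getElem_range, List.getD_eq_getElem?_getD]
  rw [List.getElem?_eq_getElem (show n < (List.replicate 9 (0:Int)).length by
    simp only [List.length_replicate]; exact hn)]
  simp only [Option.getD_some, List.getElem_replicate, zero_add]

-- ===== VERDICT (by name: the statement is the Claim_ definition above) =====
theorem game_sim_spec : Claim_equal_game_sim := by
  intro key arr _
  unfold Spec_game_sim
  rw [game_sim_eq_countP]
  unfold game_sim_alt
  rw [tally_counts]
  rw [PySem.List.foldl_ite_add_one (fun c => 1 ≤ c ∧ c ≤ key * 2)]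
  rw [List.countP_map, PySem.List.pyRange_one]
  have h9 : ((10 : Int) - 1).toNat = 9 := rfl
  rw [h9, List.countP_map]
  rw [zero_add]
  refine congrArg _ (List.countP_congr ?_)
  intro k hk
  have hmem : ((1 : Int) + (k : Int)) ∈ arr ↔ 1 ≤ (arr.count ((k : Int) + 1) : Int) := by
    rw [add_comm]
    rw [show (1 : Int) ≤ (arr.count ((k : Int) + 1) : Int) ↔
          0 < arr.count ((k : Int) + 1) from by omega]
    exact List.count_pos_iff.symm
  simp only [Function.comp, decide_eq_true_eq]
  rw [add_comm (1 : Int) (k : Int)] at hmem ⊢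
  constructor
  · rintro ⟨h1, h2⟩; exact ⟨hmem.mp h1, h2⟩
  · rintro ⟨h1, h2⟩; exact ⟨hmem.mpr h1, h2⟩
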